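-- pv_equiv track=rewrite | github.com/ShehzadKhuwaja/CS50 | python50/plates/plates.py | interwine
-- ===== SOURCE A (Python) =====
-- def interwine(s):
--     digit_discovered = False
--     for c in s:
--         if c.isdigit() and not digit_discovered:
--             digit_discovered = True
--         elif c.isalpha() and digit_discovered:
--             return True
--     return False
-- ===== SOURCE B (Python) =====
-- def interwine(s):
--     first_digit = next((i for i, c in enumerate(s) if c.isdigit()), None)
--     last_alpha = next((len(s) - 1 - j for j, c in enumerate(reversed(s)) if c.isalpha()), None)
--     return first_digit is not None and last_alpha is not None and first_digit < last_alpha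
-- ===== Notes on version B (the rewrite author's own statement) =====
-- stated objective: alternative
-- what changed: Replaces A's flag-carrying scan with two independent index computations (first digit index from the front, last letter index from the back) and a single index comparison first_digit < last_alpha.
import Mathlib
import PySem

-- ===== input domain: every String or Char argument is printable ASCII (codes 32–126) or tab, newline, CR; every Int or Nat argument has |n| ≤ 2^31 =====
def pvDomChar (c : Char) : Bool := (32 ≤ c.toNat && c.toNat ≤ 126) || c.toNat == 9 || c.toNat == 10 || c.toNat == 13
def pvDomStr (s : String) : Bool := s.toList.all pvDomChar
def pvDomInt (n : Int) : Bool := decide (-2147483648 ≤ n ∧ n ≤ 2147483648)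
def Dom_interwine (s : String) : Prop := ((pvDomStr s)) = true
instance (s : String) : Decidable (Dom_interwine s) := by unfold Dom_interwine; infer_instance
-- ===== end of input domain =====

-- B replaces A's flag-carrying scan with two independent index computations
-- (first digit from the front, last letter from the back) compared arithmetically.

-- ===== PORT A =====
-- A's loop over characters carrying the `digit_discovered` flag, with early return on a letter after a digit.
def interwineLoop : List Char → Bool → Bool
  | [], _ => false
  | c :: cs, flag =>
    if PySem.Chars.isdigit c && !flag then interwineLoop cs true
    else if PySem.Chars.isalpha c && flag then true
    else interwineLoop cs flag

def interwine (s : String) : Bool := interwineLoop s.toList false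

-- ===== PORT B =====
-- B: first_digit = index of first digit (enumerate generator → findIdx?);
--    last_alpha  = len-1-j where j = index of first letter in reversed(s);
--    result = both exist and first_digit < last_alpha.
def interwine_alt (s : String) : Bool :=
  let cs := s.toList
  match cs.findIdx? PySem.Chars.isdigit, cs.reverse.findIdx? PySem.Chars.isalpha with
  | some i, some j => decide (i < cs.length - 1 - j)
  | _, _ => false

-- ===== PRECONDITION & SPEC =====
def Spec_interwine (s : String) (out : Bool) : Prop := out = interwine_alt s
instance (s : String) (out : Bool) : Decidable (Spec_interwine s out) := by unfold Spec_interwine; infer_instance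

-- ===== CLAIM (what is proved, stated in full; the proofs are below) =====
def Claim_equal_interwine : Prop := ∀ (s : String), Dom_interwine s → Spec_interwine s (interwine s)

-- ===== LEMMAS AND PROOFS =====
-- Once the flag is set, A's loop just scans the rest for a letter (digits are never alpha).
theorem interwineLoop_true (cs : List Char) : interwineLoop cs true = cs.any PySem.Chars.isalpha := by
  induction cs with
  | nil => rfl
  | cons c cs ih =>
    simp only [interwineLoop, List.any_cons]
    by_cases h : PySem.Chars.isalpha c = true <;> simp [h, ih]

-- A's whole computation, characterised via the first digit: scan the suffix after it for a letter.
theorem interwineLoop_false (cs : List Char) :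
    interwineLoop cs false =
      (match cs.findIdx? PySem.Chars.isdigit with
       | none => false
       | some i => (cs.drop (i+1)).any PySem.Chars.isalpha) := by
  induction cs with
  | nil => rfl
  | cons c cs ih =>
    simp only [interwineLoop, List.findIdx?_cons]
    by_cases h : PySem.Chars.isdigit c = true
    · simp [h, interwineLoop_true]
    · rw [if_neg (by simp [h]), if_neg (by simp), ih, if_neg (by simp [h])]
      cases hf : cs.findIdx? PySem.Chars.isdigit <;> simp [List.drop_succ_cons]

-- Suffix-scan for a letter equals the comparison with the last letter's index.
theorem any_drop_eq_last_alpha (cs : List Char) (i : Nat) :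
    (cs.drop (i+1)).any PySem.Chars.isalpha =
      (match cs.reverse.findIdx? PySem.Chars.isalpha with
       | none => false
       | some j => decide (i < cs.length - 1 - j)) := by
  cases hj : cs.reverse.findIdx? PySem.Chars.isalpha with
  | none =>
    rw [List.findIdx?_eq_none_iff] at hj
    rw [List.any_eq_false]
    intro x hx
    simpa using hj x (by simpa using List.mem_of_mem_drop hx)
  | some j =>
    rw [List.findIdx?_eq_some_iff_getElem] at hj
    obtain ⟨hjlt, hpj, hmin⟩ := hj
    rw [List.length_reverse] at hjlt
    -- k is the index (from the front) of the last letter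
    set k := cs.length - 1 - j with hk
    have hklt : k < cs.length := by omega
    have hjk : cs.reverse[j]'(by simpa using hjlt) = cs[k] := by
      rw [List.getElem_reverse]
    have hpk : PySem.Chars.isalpha cs[k] = true := by rw [← hjk]; exact hpj
    -- no letter strictly after k
    have hafter : ∀ m (hm : m < cs.length), k < m → PySem.Chars.isalpha cs[m] = false := by
      intro m hm hkm
      have hj' : cs.length - 1 - m < j := by omega
      have := hmin (cs.length - 1 - m) hj'
      have hidx : cs.length - 1 - (cs.length - 1 - m) = m := by omega
      have hrev : cs.reverse[cs.length - 1 - m]'(by simp; omega) = cs[m] := by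
        simp [List.getElem_reverse, hidx]
      simpa [hrev] using this
    rw [Bool.eq_iff_iff]
    simp only [List.any_eq_true, decide_eq_true_eq]
    by_cases hik : i < k
    · constructor
      · intro _; omega
      · intro _
        refine ⟨cs[k], ?_, hpk⟩
        rw [List.mem_drop_iff_getElem]
        exact ⟨k - (i+1), by omega, by congr 1; omega⟩
    · constructor
      · rintro ⟨x, hx, hpx⟩
        rw [List.mem_drop_iff_getElem] at hx
        obtain ⟨m, hm, rfl⟩ := hx
        have := hafter (i + 1 + m) (by omega) (by omega)
        rw [this] at hpx; exact absurd hpx (by simp)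
      · intro h; omega

-- ===== VERDICT (by name: the statement is the Claim_ definition above) =====
theorem interwine_spec : Claim_equal_interwine := by
  intro s _
  unfold Spec_interwine interwine interwine_alt
  rw [interwineLoop_false]
  cases hf : s.toList.findIdx? PySem.Chars.isdigit with
  | none => simp [hf]
  | some i =>
    simp only [hf]
    rw [any_drop_eq_last_alpha s.toList i]
    cases s.toList.reverse.findIdx? PySem.Chars.isalpha <;> rfl
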